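-- pv_equiv track=rewrite | github.com/adeebkm/Khairvc | email_classifier.py | check_fundraising_keywords
-- ===== SOURCE A (Python) =====
-- def check_fundraising_keywords(subject: str, body: str) -> bool:
--     """Check for fundraising/pitch keywords"""
--     keywords = [
--         'raising', 'seed', 'series', 'pitch', 'invest', 'round',
--         'deck', 'dataroom', 'docsend', 'drive', 'dropbox', 'notion',
--         'fundraising', 'funding', 'capital', 'investor', 'vc',
--         'investment', 'startup', 'founder', 'equity', 'valuation'
--     ]
--
--     text = f"{subject} {body}".lower()
--     return any(keyword in text for keyword in keywords)
-- ===== SOURCE B (Python) =====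
-- # Different algorithm: index the keywords by FIRST LETTER once (a dispatch
-- # table char -> tuple of keyword tails), then make ONE left-to-right pass over
-- # the combined lowercased text; at each position only the (few) keywords whose
-- # first letter matches the current character are tested, via a prefix check of
-- # their tail at the next position.  Same result as testing each keyword as a
-- # substring of the whole text.
-- _BUCKETS = {
--     'r': ('aising', 'ound'),
--     's': ('eed', 'eries', 'tartup'),
--     'p': ('itch',),
--     'i': ('nvest', 'nvestor', 'nvestment'),
--     'd': ('eck', 'ataroom', 'ocsend', 'rive', 'ropbox'),
--     'n': ('otion',),
--     'f': ('undraising', 'unding', 'ounder'),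
--     'c': ('apital',),
--     'v': ('c', 'aluation'),
--     'e': ('quity',),
-- }
--
--
-- def check_fundraising_keywords(subject: str, body: str) -> bool:
--     """Check for fundraising/pitch keywords"""
--     text = f"{subject} {body}".lower()
--     for i, ch in enumerate(text):
--         for tail in _BUCKETS.get(ch, ()):
--             if text.startswith(tail, i + 1):
--                 return True
--     return False
-- ===== Notes on version B (the rewrite author's own statement) =====
-- stated objective: alternative
-- what changed: Replaces A's 22 independent 'kw in text' substring scans with a first-letter dispatch table (dict from initial character to keyword tails) driving a single left-to-right pass over the text, testing only the tails whose first letter matches the current character.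
import Mathlib
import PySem

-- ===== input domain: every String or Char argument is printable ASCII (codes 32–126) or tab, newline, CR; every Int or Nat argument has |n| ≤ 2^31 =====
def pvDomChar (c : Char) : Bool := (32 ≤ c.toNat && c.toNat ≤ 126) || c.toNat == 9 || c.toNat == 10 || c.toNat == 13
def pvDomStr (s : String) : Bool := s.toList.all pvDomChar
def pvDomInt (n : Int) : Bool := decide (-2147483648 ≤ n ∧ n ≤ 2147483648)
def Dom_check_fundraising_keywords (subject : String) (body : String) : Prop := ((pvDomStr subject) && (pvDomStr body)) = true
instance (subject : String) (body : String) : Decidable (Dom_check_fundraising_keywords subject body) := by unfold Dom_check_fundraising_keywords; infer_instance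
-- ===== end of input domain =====

-- B replaces A's 22 independent 'kw in text' substring scans by a first-letter
-- dispatch table (dict: initial char ↦ keyword tails) driving one left-to-right
-- pass over the text (objective: alternative).

-- ===== PORT A =====
-- the keyword list of A (each string as its list of characters)
def pvKeywordsA : List (List Char) :=
  [['r', 'a', 'i', 's', 'i', 'n', 'g'],
   ['s', 'e', 'e', 'd'],
   ['s', 'e', 'r', 'i', 'e', 's'],
   ['p', 'i', 't', 'c', 'h'],
   ['i', 'n', 'v', 'e', 's', 't'],
   ['r', 'o', 'u', 'n', 'd'],
   ['d', 'e', 'c', 'k'],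
   ['d', 'a', 't', 'a', 'r', 'o', 'o', 'm'],
   ['d', 'o', 'c', 's', 'e', 'n', 'd'],
   ['d', 'r', 'i', 'v', 'e'],
   ['d', 'r', 'o', 'p', 'b', 'o', 'x'],
   ['n', 'o', 't', 'i', 'o', 'n'],
   ['f', 'u', 'n', 'd', 'r', 'a', 'i', 's', 'i', 'n', 'g'],
   ['f', 'u', 'n', 'd', 'i', 'n', 'g'],
   ['c', 'a', 'p', 'i', 't', 'a', 'l'],
   ['i', 'n', 'v', 'e', 's', 't', 'o', 'r'],
   ['v', 'c'],
   ['i', 'n', 'v', 'e', 's', 't', 'm', 'e', 'n', 't'],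
   ['s', 't', 'a', 'r', 't', 'u', 'p'],
   ['f', 'o', 'u', 'n', 'd', 'e', 'r'],
   ['e', 'q', 'u', 'i', 't', 'y'],
   ['v', 'a', 'l', 'u', 'a', 't', 'i', 'o', 'n']]

-- text = f"{subject} {body}".lower(); any(keyword in text for keyword in keywords)
def check_fundraising_keywords (subject : String) (body : String) : Bool :=
  let text := PySem.Chars.lower (subject.toList ++ ' ' :: body.toList)
  pvKeywordsA.any (fun kw => PySem.Chars.isIn kw text)

-- ===== PORT B =====
-- B's dispatch table _BUCKETS: first letter ↦ the tails of the keywords that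
-- begin with it (tail strings written as char lists, PySem's list-side view)
def pvBuckets : PySem.Dict Char (List (List Char)) :=
  PySem.Dict.mk
    [('r', [['a','i','s','i','n','g'], ['o','u','n','d']]),
     ('s', [['e','e','d'], ['e','r','i','e','s'], ['t','a','r','t','u','p']]),
     ('p', [['i','t','c','h']]),
     ('i', [['n','v','e','s','t'], ['n','v','e','s','t','o','r'], ['n','v','e','s','t','m','e','n','t']]),
     ('d', [['e','c','k'], ['a','t','a','r','o','o','m'], ['o','c','s','e','n','d'], ['r','i','v','e'], ['r','o','p','b','o','x']]),
     ('n', [['o','t','i','o','n']]),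
     ('f', [['u','n','d','r','a','i','s','i','n','g'], ['u','n','d','i','n','g'], ['o','u','n','d','e','r']]),
     ('c', [['a','p','i','t','a','l']]),
     ('v', [['c'], ['a','l','u','a','t','i','o','n']]),
     ('e', [['q','u','i','t','y']])]

-- 'for i, ch in enumerate(text): for tail in _BUCKETS.get(ch, ()):
--    if text.startswith(tail, i + 1): return True' — ported as structural
-- recursion over the suffixes of text: text.startswith(tail, i+1) is exactly
-- PySem.Chars.startswith of the list after the current character.
def pvScanB : List Char → Bool
  | [] => false
  | ch :: rest =>
      ((PySem.Dict.getD pvBuckets ch []).any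
        (fun tail => PySem.Chars.startswith rest tail)) || pvScanB rest

def check_fundraising_keywords_alt (subject : String) (body : String) : Bool :=
  pvScanB (PySem.Chars.lower (subject.toList ++ ' ' :: body.toList))

-- ===== PRECONDITION & SPEC =====
def Spec_check_fundraising_keywords (subject : String) (body : String) (out : Bool) : Prop := out = check_fundraising_keywords_alt subject body
instance (subject : String) (body : String) (out : Bool) : Decidable (Spec_check_fundraising_keywords subject body out) := by unfold Spec_check_fundraising_keywords; infer_instance

-- ===== CLAIM (what is proved, stated in full; the proofs are below) =====
def Claim_equal_check_fundraising_keywords : Prop := ∀ (subject : String) (body : String), Dom_check_fundraising_keywords subject body → Spec_check_fundraising_keywords subject body (check_fundraising_keywords subject body)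

-- ===== LEMMAS AND PROOFS =====

-- at one position, B's bucket test finds a tail iff some full keyword of A is a
-- prefix there: case split on the bucket lookup, one branch per first letter
set_option maxHeartbeats 1000000 in
theorem pvStep_iff (ch : Char) (rest : List Char) :
    ((PySem.Dict.getD pvBuckets ch []).any
      (fun tail => PySem.Chars.startswith rest tail)) = true
    ↔ ∃ kw ∈ pvKeywordsA, kw <+: ch :: rest := by
  simp only [pvKeywordsA, List.mem_cons, List.not_mem_nil, or_false, exists_eq_or_imp,
    exists_eq_left, List.cons_prefix_cons]
  simp only [pvBuckets, PySem.Dict.getD, PySem.Dict.get?_mk_cons]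
  split_ifs with h1 h2 h3 h4 h5 h6 h7 h8 h9 h10
  · obtain rfl := eq_of_beq h1; simp [PySem.Chars.startswith_iff]
  · obtain rfl := eq_of_beq h2; simp [PySem.Chars.startswith_iff]
  · obtain rfl := eq_of_beq h3; simp [PySem.Chars.startswith_iff]
  · obtain rfl := eq_of_beq h4; simp [PySem.Chars.startswith_iff]
  · obtain rfl := eq_of_beq h5; simp [PySem.Chars.startswith_iff]
  · obtain rfl := eq_of_beq h6; simp [PySem.Chars.startswith_iff]
  · obtain rfl := eq_of_beq h7; simp [PySem.Chars.startswith_iff]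
  · obtain rfl := eq_of_beq h8; simp [PySem.Chars.startswith_iff]
  · obtain rfl := eq_of_beq h9; simp [PySem.Chars.startswith_iff]
  · obtain rfl := eq_of_beq h10; simp [PySem.Chars.startswith_iff]
  · simp_all [PySem.Dict.get?]

-- B's scan finds a keyword iff some keyword is an infix of the text
theorem pvScanB_iff (t : List Char) :
    pvScanB t = true ↔ ∃ kw ∈ pvKeywordsA, kw <:+: t := by
  induction t with
  | nil =>
      simp only [pvScanB]
      constructor
      · intro h; exact absurd h (by decide)
      · intro h; exact absurd h (by decide)
  | cons c rest ih =>
      simp only [pvScanB, Bool.or_eq_true, pvStep_iff, ih, List.infix_cons_iff]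
      constructor
      · rintro (⟨kw, hkw, h⟩ | ⟨kw, hkw, h⟩)
        · exact ⟨kw, hkw, Or.inl h⟩
        · exact ⟨kw, hkw, Or.inr h⟩
      · rintro ⟨kw, hkw, h | h⟩
        · exact Or.inl ⟨kw, hkw, h⟩
        · exact Or.inr ⟨kw, hkw, h⟩

-- ===== VERDICT (by name: the statement is the Claim_ definition above) =====
theorem check_fundraising_keywords_spec : Claim_equal_check_fundraising_keywords := by
  intro subject body _
  unfold Spec_check_fundraising_keywords check_fundraising_keywords check_fundraising_keywords_alt
  rw [Bool.eq_iff_iff, pvScanB_iff]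
  simp only [List.any_eq_true, PySem.Chars.isIn_iff_infix]
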